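-- pv_equiv track=rewrite | github.com/nikolay-e/treemapper | src/treemapper/diffctx/fragments.py | _compute_bracket_balance
-- ===== SOURCE A (Python) =====
-- _BRACKET_PAIRS = {"{": "}", "[": "]", "(": ")"}
--
-- _CLOSE_BRACKETS = set(_BRACKET_PAIRS.values())
--
-- def _compute_bracket_balance(text: str) -> int:
--     stack: list[str] = []
--     in_string = False
--     string_char = ""
--     escape_count = 0
--
--     for char in text:
--         if in_string:
--             if char == "\\":
--                 escape_count += 1
--             elif char == string_char and escape_count % 2 == 0:
--                 in_string = False
--                 escape_count = 0
--             else: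
--                 escape_count = 0
--         else:
--             if char in ('"', "'"):
--                 in_string = True
--                 string_char = char
--                 escape_count = 0
--             elif char in _BRACKET_PAIRS:
--                 stack.append(_BRACKET_PAIRS[char])
--             elif char in _CLOSE_BRACKETS:
--                 if stack and stack[-1] == char:
--                     stack.pop()
--
--     return len(stack)
-- ===== SOURCE B (Python) =====
-- _BRACKET_PAIRS = {"{": "}", "[": "]", "(": ")"}
--
--
-- def _strip_strings(text):
--     """First pass: keep only the characters that occur outside string literals."""
--     out = []
--     in_string = False
--     string_char = ""
--     escaped = False
--     for char in text:
--         if in_string: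
--             if char == "\\":
--                 escaped = not escaped
--             elif char == string_char and not escaped:
--                 in_string = False
--                 escaped = False
--             else:
--                 escaped = False
--         else:
--             if char in ('"', "'"):
--                 in_string = True
--                 string_char = char
--                 escaped = False
--             else:
--                 out.append(char)
--     return out
--
--
-- def _compute_bracket_balance(text: str) -> int:
--     # Second pass: a stack of expected closers over the string-free characters.
--     stack = []
--     for char in _strip_strings(text):
--         if char in _BRACKET_PAIRS:
--             stack.append(_BRACKET_PAIRS[char])
--         elif stack and stack[-1] == char:
--             stack.pop()
--     return len(stack)
-- ===== Notes on version B (the rewrite author's own statement) =====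
-- stated objective: alternative
-- what changed: A's single fused loop (string-state machine with an integer escape counter driving the bracket stack inline) is split into two passes: a first pass that filters out string literals using a toggled escape boolean, and a second independent stack pass over the surviving characters.
import Mathlib
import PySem

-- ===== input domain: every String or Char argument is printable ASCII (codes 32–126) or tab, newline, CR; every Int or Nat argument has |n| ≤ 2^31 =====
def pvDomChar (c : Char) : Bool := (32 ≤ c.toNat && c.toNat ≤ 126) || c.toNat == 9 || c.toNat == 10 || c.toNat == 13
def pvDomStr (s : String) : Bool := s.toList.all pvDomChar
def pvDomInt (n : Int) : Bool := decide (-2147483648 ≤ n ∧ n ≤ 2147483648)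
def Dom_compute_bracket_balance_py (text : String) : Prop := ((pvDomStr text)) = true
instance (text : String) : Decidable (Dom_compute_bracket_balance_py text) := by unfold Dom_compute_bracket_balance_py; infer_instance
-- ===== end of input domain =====

-- B splits A's single loop into two passes: first strip string-literal contents
-- (escape tracked by a toggled boolean instead of A's counter), then run the
-- bracket stack over the string-free characters; objective: alternative decomposition.

-- _BRACKET_PAIRS lookup (shared module constant of both versions)
def pyBracketPairs : Char → Option Char
  | '{' => some '}'
  | '[' => some ']'
  | '(' => some ')'
  | _ => none

-- char ∈ _CLOSE_BRACKETS
def pyIsClose (c : Char) : Bool := c = '}' || c = ']' || c = ')'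

-- ===== PORT A =====
-- state = (stack, in_string, string_char, escape_count); Python's string_char starts as ""
-- (never equal to any one char), modelled as Option Char starting at none.
def aStep (st : List Char × Bool × Option Char × Int) (c : Char) :
    List Char × Bool × Option Char × Int :=
  match st with
  | (stack, in_string, string_char, escape_count) =>
    if in_string then
      if c = '\\' then (stack, in_string, string_char, escape_count + 1)
      else if some c = string_char ∧ PySem.Int.mod escape_count 2 = 0 then
        (stack, false, string_char, 0)
      else (stack, in_string, string_char, 0)
    else
      if c = '"' ∨ c = '\'' then (stack, true, some c, 0)
      else
        match pyBracketPairs c with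
        | some cl => (stack ++ [cl], in_string, string_char, escape_count)
        | none =>
          if pyIsClose c then
            if stack ≠ [] ∧ stack.getLast? = some c then
              (stack.dropLast, in_string, string_char, escape_count)
            else (stack, in_string, string_char, escape_count)
          else (stack, in_string, string_char, escape_count)

def compute_bracket_balance_py (text : String) : Int :=
  ((text.toList.foldl aStep ([], false, none, 0)).1.length : Int)

-- ===== PORT B =====
-- state = (out, in_string, string_char, escaped)
def stripStep (st : List Char × Bool × Option Char × Bool) (c : Char) :
    List Char × Bool × Option Char × Bool :=
  match st with
  | (out, in_string, string_char, escaped) =>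
    if in_string then
      if c = '\\' then (out, in_string, string_char, !escaped)
      else if some c = string_char ∧ escaped = false then (out, false, string_char, false)
      else (out, in_string, string_char, false)
    else
      if c = '"' ∨ c = '\'' then (out, true, some c, false)
      else (out ++ [c], in_string, string_char, escaped)

def stripStrings (text : String) : List Char :=
  (text.toList.foldl stripStep ([], false, none, false)).1

def stackStep (stack : List Char) (c : Char) : List Char :=
  match pyBracketPairs c with
  | some cl => stack ++ [cl]
  | none =>
    if stack ≠ [] ∧ stack.getLast? = some c then stack.dropLast else stack

def compute_bracket_balance_py_alt (text : String) : Int :=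
  (((stripStrings text).foldl stackStep []).length : Int)

-- ===== PRECONDITION & SPEC =====
def Spec_compute_bracket_balance_py (text : String) (out : Int) : Prop := out = compute_bracket_balance_py_alt text
instance (text : String) (out : Int) : Decidable (Spec_compute_bracket_balance_py text out) := by unfold Spec_compute_bracket_balance_py; infer_instance

-- ===== CLAIM (what is proved, stated in full; the proofs are below) =====
def Claim_equal_compute_bracket_balance_py : Prop := ∀ (text : String), Dom_compute_bracket_balance_py text → Spec_compute_bracket_balance_py text (compute_bracket_balance_py text)

-- ===== LEMMAS AND PROOFS =====

-- escape parity flips when the counter is incremented / the boolean is toggled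
theorem parity_flip (ec : Int) (esc : Bool) (h : esc = true ↔ ¬ PySem.Int.mod ec 2 = 0) :
    (!esc) = true ↔ ¬ PySem.Int.mod (ec + 1) 2 = 0 := by
  have h2 : PySem.Int.mod ec 2 = ec % 2 := PySem.Int.mod_eq_emod_of_pos (by norm_num)
  have h3 : PySem.Int.mod (ec + 1) 2 = (ec + 1) % 2 := PySem.Int.mod_eq_emod_of_pos (by norm_num)
  rw [h2] at h
  rw [h3]
  have hb0 : 0 ≤ ec % 2 := Int.emod_nonneg ec (by norm_num)
  have hb1 : ec % 2 < 2 := Int.emod_lt_of_pos ec (by norm_num)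
  have hb2 := Int.emod_emod_of_dvd ec (dvd_refl (2 : Int))
  cases esc <;> simp_all <;> omega

-- one filter step is additive in its output accumulator
theorem stripStep_out (out : List Char) (i : Bool) (s : Option Char) (e : Bool) (c : Char) :
    stripStep (out, i, s, e) c =
      (out ++ (stripStep ([], i, s, e) c).1, (stripStep ([], i, s, e) c).2) := by
  cases i
  · by_cases hq : c = '"' ∨ c = '\''
    · simp [stripStep, hq]
    · simp [stripStep, hq]
  · by_cases hb : c = '\\'
    · simp [stripStep, hb]
    · by_cases hse : some c = s ∧ e = false
      · simp only [stripStep, if_true]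
        rw [if_neg hb, if_neg hb, if_pos hse, if_pos hse]
        simp
      · simp only [stripStep, if_true]
        rw [if_neg hb, if_neg hb, if_neg hse, if_neg hse]
        simp

-- so is the whole filter pass
theorem strip_out (cs : List Char) :
    ∀ (out : List Char) (i : Bool) (s : Option Char) (e : Bool),
    cs.foldl stripStep (out, i, s, e) =
      (out ++ (cs.foldl stripStep ([], i, s, e)).1, (cs.foldl stripStep ([], i, s, e)).2) := by
  induction cs with
  | nil => intro out i s e; simp
  | cons c cs ih =>
    intro out i s e
    simp only [List.foldl_cons]
    rw [stripStep_out]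
    rcases h1 : stripStep ([], i, s, e) c with ⟨o1, i1, s1, e1⟩
    dsimp only
    rw [ih (out ++ o1), ih o1]
    simp [List.append_assoc]

-- the B-side stack pass over a concatenation
theorem stack_append (l1 l2 : List Char) (stack : List Char) :
    (l1 ++ l2).foldl stackStep stack = l2.foldl stackStep (l1.foldl stackStep stack) := by
  simp [List.foldl_append]

-- every closing bracket produced by _BRACKET_PAIRS is in _CLOSE_BRACKETS
theorem pairs_close (c cl : Char) (h : pyBracketPairs c = some cl) : pyIsClose cl = true := by
  unfold pyBracketPairs at h
  split at h <;> cases h <;> decide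

-- stack invariant: everything pushed is a closing bracket
theorem stackStep_closers (stack : List Char) (c : Char)
    (h : ∀ x ∈ stack, pyIsClose x = true) : ∀ x ∈ stackStep stack c, pyIsClose x = true := by
  intro x hx
  unfold stackStep at hx
  cases hp : pyBracketPairs c with
  | some cl =>
    simp only [hp] at hx
    rcases List.mem_append.mp hx with hx | hx
    · exact h x hx
    · simp only [List.mem_singleton] at hx
      subst hx
      exact pairs_close c _ hp
  | none =>
    simp only [hp] at hx
    split at hx
    · exact h x (List.dropLast_subset _ hx)
    · exact h x hx

-- outside a string, one A step is exactly one B stack step (given the invariant)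
theorem aStep_outside (stack : List Char) (sc : Option Char) (ec : Int) (c : Char)
    (hq : ¬ (c = '"' ∨ c = '\'')) (hst : ∀ x ∈ stack, pyIsClose x = true) :
    aStep (stack, false, sc, ec) c = (stackStep stack c, false, sc, ec) := by
  simp only [aStep, stackStep, Bool.false_eq_true, if_false]
  rw [if_neg hq]
  cases hp : pyBracketPairs c with
  | some cl => simp only [hp]
  | none =>
    simp only [hp]
    by_cases hcl : pyIsClose c = true
    · rw [if_pos hcl]
      split_ifs <;> rfl
    · have hpop : ¬ (stack ≠ [] ∧ stack.getLast? = some c) := by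
        rintro ⟨hne, hlast⟩
        exact hcl (hst c (List.mem_of_getLast? hlast))
      rw [if_neg hcl, if_neg hpop]

-- main invariant: A's single fold equals B's stack pass over B's filter, for any
-- aligned pair of states (escaped ↔ escape_count odd; stack all closers)
theorem main_inv (cs : List Char) :
    ∀ (stack : List Char) (instr : Bool) (sc : Option Char) (ec : Int) (esc : Bool),
    (esc = true ↔ ¬ PySem.Int.mod ec 2 = 0) →
    (∀ x ∈ stack, pyIsClose x = true) →
    (cs.foldl aStep (stack, instr, sc, ec)).1 =
      ((cs.foldl stripStep ([], instr, sc, esc)).1).foldl stackStep stack := by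
  induction cs with
  | nil => intro stack instr sc ec esc _ _; simp
  | cons c cs ih =>
    intro stack instr sc ec esc hesc hst
    simp only [List.foldl_cons]
    cases instr with
    | true =>
      by_cases hb : c = '\\'
      · subst hb
        have ha : aStep (stack, true, sc, ec) '\\' = (stack, true, sc, ec + 1) := by
          simp only [aStep, if_true]
        have hb2 : stripStep ([], true, sc, esc) '\\' = ([], true, sc, !esc) := by
          simp only [stripStep, if_true]
        rw [ha, hb2]
        exact ih _ _ _ _ _ (parity_flip ec esc hesc) hst
      · by_cases hc : some c = sc ∧ PySem.Int.mod ec 2 = 0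
        · have ha : aStep (stack, true, sc, ec) c = (stack, false, sc, 0) := by
            simp only [aStep, if_true]
            rw [if_neg hb, if_pos hc]
          have he0 : esc = false := by
            cases esc
            · rfl
            · exact absurd hc.2 (hesc.mp rfl)
          have hb2 : stripStep ([], true, sc, esc) c = ([], false, sc, false) := by
            simp only [stripStep, if_true]
            rw [if_neg hb, if_pos ⟨hc.1, he0⟩]
          rw [ha, hb2]
          exact ih _ _ _ _ _ (by decide) hst
        · have ha : aStep (stack, true, sc, ec) c = (stack, true, sc, 0) := by
            simp only [aStep, if_true]
            rw [if_neg hb, if_neg hc]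
          have hc' : ¬ (some c = sc ∧ esc = false) := by
            rintro ⟨h1, h2⟩
            subst h2
            have : PySem.Int.mod ec 2 = 0 := by
              by_contra hm
              exact absurd (hesc.mpr hm) (by simp)
            exact hc ⟨h1, this⟩
          have hb2 : stripStep ([], true, sc, esc) c = ([], true, sc, false) := by
            simp only [stripStep, if_true]
            rw [if_neg hb, if_neg hc']
          rw [ha, hb2]
          exact ih _ _ _ _ _ (by decide) hst
    | false =>
      by_cases hq : c = '"' ∨ c = '\''
      · have ha : aStep (stack, false, sc, ec) c = (stack, true, some c, 0) := by
          simp only [aStep, Bool.false_eq_true, if_false]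
          rw [if_pos hq]
        have hb2 : stripStep ([], false, sc, esc) c = ([], true, some c, false) := by
          simp only [stripStep, Bool.false_eq_true, if_false]
          rw [if_pos hq]
        rw [ha, hb2]
        exact ih _ _ _ _ _ (by decide) hst
      · have hb2 : stripStep ([], false, sc, esc) c = ([c], false, sc, esc) := by
          simp only [stripStep, Bool.false_eq_true, if_false]
          rw [if_neg hq]
          simp
        rw [hb2, aStep_outside stack sc ec c hq hst]
        have hrw1 : (cs.foldl stripStep ([c], false, sc, esc)).1 =
            [c] ++ (cs.foldl stripStep ([], false, sc, esc)).1 := by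
          rw [strip_out]
        rw [ih (stackStep stack c) false sc ec esc hesc (stackStep_closers stack c hst),
          hrw1, stack_append]
        simp only [List.foldl_cons, List.foldl_nil]

-- ===== VERDICT (by name: the statement is the Claim_ definition above) =====
theorem compute_bracket_balance_py_spec : Claim_equal_compute_bracket_balance_py := by
  intro text _
  unfold Spec_compute_bracket_balance_py compute_bracket_balance_py compute_bracket_balance_py_alt stripStrings
  rw [main_inv text.toList [] false none 0 false (by decide) (by intro x hx; simp at hx)]
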